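-- pv_equiv track=rewrite | github.com/Wagnerjuniorr/30-Days-Of-Python | Dia_14/Exercicios.py | categorize_countries
-- ===== SOURCE A (Python) =====
-- def categorize_countries(countries):
--     land_countries = []
--     ia_countries = []
--     island_countries = []
--     stan_countries = []
--     other_countries = []
--
--     for country in countries:
--         if 'land' in country:
--             if 'island' in country:
--                 island_countries.append(country)
--             land_countries.append(country)
--         elif 'ia' in country:
--             ia_countries.append(country)
--         elif 'stan' in country:
--             stan_countries.append(country)
--         else:
--             other_countries.append(country)
--     return land_countries, island_countries, ia_countries, stan_countries, other_countries
-- ===== SOURCE B (Python) =====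
-- def categorize_countries(countries):
--     land = [c for c in countries if 'land' in c]
--     island = [c for c in countries if 'island' in c]
--     ia = [c for c in countries if 'land' not in c and 'ia' in c]
--     stan = [c for c in countries if 'land' not in c and 'ia' not in c and 'stan' in c]
--     other = [c for c in countries if 'land' not in c and 'ia' not in c and 'stan' not in c]
--     return land, island, ia, stan, other
-- ===== Notes on version B (the rewrite author's own statement) =====
-- stated objective: alternative
-- what changed: Replaces the single accumulator loop with nested branches by five independent filter comprehensions, one per output list, with the elif precedence flattened into explicit negated conditions.
import Mathlib
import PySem

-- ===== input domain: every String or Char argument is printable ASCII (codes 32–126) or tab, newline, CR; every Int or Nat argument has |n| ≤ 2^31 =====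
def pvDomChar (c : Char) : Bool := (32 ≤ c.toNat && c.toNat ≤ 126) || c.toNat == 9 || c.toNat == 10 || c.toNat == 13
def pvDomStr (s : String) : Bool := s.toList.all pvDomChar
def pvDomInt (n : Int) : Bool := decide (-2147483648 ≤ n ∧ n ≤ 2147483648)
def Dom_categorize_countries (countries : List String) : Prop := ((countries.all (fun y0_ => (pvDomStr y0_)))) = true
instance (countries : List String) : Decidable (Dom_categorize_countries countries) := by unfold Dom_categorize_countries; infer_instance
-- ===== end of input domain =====

-- B replaces A's single loop with nested elif branches by five independent filter passes
-- (one per output list) with the precedence flattened into explicit negations: alternative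
-- decomposition, same cost.

-- ===== PORT A =====
-- state = (land_countries, ia_countries, island_countries, stan_countries, other_countries),
-- in Python declaration order; each branch appends at the end, as the Python does.
def categorize_countries_step
    (acc : List String × List String × List String × List String × List String)
    (country : String) :
    List String × List String × List String × List String × List String :=
  let (land, ia, island, stan, other) := acc
  if PySem.Str.isIn "land" country then
    let island := if PySem.Str.isIn "island" country then island ++ [country] else island
    (land ++ [country], ia, island, stan, other)
  else if PySem.Str.isIn "ia" country then
    (land, ia ++ [country], island, stan, other)
  else if PySem.Str.isIn "stan" country then
    (land, ia, island, stan ++ [country], other)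
  else
    (land, ia, island, stan, other ++ [country])

def categorize_countries (countries : List String) :
    List String × List String × List String × List String × List String :=
  let (land, ia, island, stan, other) :=
    countries.foldl categorize_countries_step ([], [], [], [], [])
  (land, island, ia, stan, other)

-- ===== PORT B =====
def categorize_countries_alt (countries : List String) :
    List String × List String × List String × List String × List String :=
  let land := countries.filter (fun c => PySem.Str.isIn "land" c)
  let island := countries.filter (fun c => PySem.Str.isIn "island" c)
  let ia := countries.filter (fun c => !PySem.Str.isIn "land" c && PySem.Str.isIn "ia" c)
  let stan := countries.filter (fun c =>
    !PySem.Str.isIn "land" c && !PySem.Str.isIn "ia" c && PySem.Str.isIn "stan" c)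
  let other := countries.filter (fun c =>
    !PySem.Str.isIn "land" c && !PySem.Str.isIn "ia" c && !PySem.Str.isIn "stan" c)
  (land, island, ia, stan, other)

-- ===== PRECONDITION & SPEC =====
def Spec_categorize_countries (countries : List String) (out : List String × List String × List String × List String × List String) : Prop := out = categorize_countries_alt countries
instance (countries : List String) (out : List String × List String × List String × List String × List String) : Decidable (Spec_categorize_countries countries out) := by unfold Spec_categorize_countries; infer_instance

-- ===== CLAIM (what is proved, stated in full; the proofs are below) =====
def Claim_equal_categorize_countries : Prop := ∀ (countries : List String), Dom_categorize_countries countries → Spec_categorize_countries countries (categorize_countries countries)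

-- ===== LEMMAS AND PROOFS =====

-- 'island' in c implies 'land' in c ("land" is a substring of "island")
lemma isIn_land_of_isIn_island (c : List Char) (h : PySem.Chars.isIn ['i','s','l','a','n','d'] c = true) :
    PySem.Chars.isIn ['l','a','n','d'] c = true := by
  rw [PySem.Chars.isIn_iff_infix] at h ⊢
  exact List.IsInfix.trans (by decide) h

lemma categorize_countries_loop (xs : List String) (l ia isl s o : List String) :
    xs.foldl categorize_countries_step (l, ia, isl, s, o) =
      (l ++ xs.filter (fun c => PySem.Str.isIn "land" c),
       ia ++ xs.filter (fun c => !PySem.Str.isIn "land" c && PySem.Str.isIn "ia" c),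
       isl ++ xs.filter (fun c => PySem.Str.isIn "island" c),
       s ++ xs.filter (fun c =>
         !PySem.Str.isIn "land" c && !PySem.Str.isIn "ia" c && PySem.Str.isIn "stan" c),
       o ++ xs.filter (fun c =>
         !PySem.Str.isIn "land" c && !PySem.Str.isIn "ia" c && !PySem.Str.isIn "stan" c)) := by
  induction xs generalizing l ia isl s o with
  | nil => simp
  | cons c xs ih =>
    simp only [List.foldl_cons, List.filter_cons]
    by_cases hland : PySem.Chars.isIn ['l','a','n','d'] c.toList = true
    · by_cases hisl : PySem.Chars.isIn ['i','s','l','a','n','d'] c.toList = true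
      · simp [categorize_countries_step, hland, hisl, ih]
      · simp [categorize_countries_step, hland, hisl, ih]
    · have hisl : PySem.Chars.isIn ['i','s','l','a','n','d'] c.toList = false := by
        by_contra h
        exact hland (isIn_land_of_isIn_island c.toList (by simpa using h))
      by_cases hia : PySem.Chars.isIn ['i','a'] c.toList = true
      · simp [categorize_countries_step, hland, hisl, hia, ih]
      · by_cases hstan : PySem.Chars.isIn ['s','t','a','n'] c.toList = true
        · simp [categorize_countries_step, hland, hisl, hia, hstan, ih]
        · simp [categorize_countries_step, hland, hisl, hia, hstan, ih]

-- ===== VERDICT (by name: the statement is the Claim_ definition above) =====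
theorem categorize_countries_spec : Claim_equal_categorize_countries := by
  intro countries _
  unfold Spec_categorize_countries categorize_countries categorize_countries_alt
  rw [categorize_countries_loop]
  simp
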